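-- pv_equiv track=rewrite | github.com/mattercu/ddosssserpace- | srcweb.py | detect_waf_cdn_advanced
-- ===== SOURCE A (Python) =====
-- def detect_waf_cdn_advanced(headers, content=''):
--     """Enhanced WAF and CDN detection"""
--     waf_cdn = {}
--     headers_lower = {k.lower(): v for k, v in headers.items()}
--     content_lower = content.lower()
--
--     cdn_signatures = {
--         'Cloudflare': ['cf-ray', 'cf-cache-status', '__cfduid'],
--         'Akamai': ['x-akamai', 'akamai-origin-hop'],
--         'AWS CloudFront': ['x-amz-cf-id', 'via'],
--         'Fastly': ['x-fastly', 'fastly-io'],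
--         'Cloudfront': ['cloudfront'],
--         'Incapsula': ['x-cdn', 'incap_ses'],
--         'Sucuri': ['x-sucuri']
--     }
--
--     waf_signatures = {
--         'ModSecurity': ['mod_security', 'modsecurity'],
--         'AWS WAF': ['x-amzn-requestid'],
--         'Cloudflare WAF': ['cf-ray'],
--         'Imperva': ['incapsula', 'visid_incap'],
--         'F5 BIG-IP': ['bigipserver', 'f5-'],
--         'Barracuda': ['barra_counter_session'],
--         'Wordfence': ['wordfence']
--     }
--
--     for name, signatures in {**cdn_signatures, **waf_signatures}.items():
--         for sig in signatures:
--             if any(sig in h for h in headers_lower.keys()) or sig in content_lower: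
--                 waf_cdn[name] = 'Detected'
--                 break
--
--     return waf_cdn
-- ===== SOURCE B (Python) =====
-- def detect_waf_cdn_advanced(headers, content=''):
--     """Enhanced WAF and CDN detection (single combined haystack)."""
--     # One search string: all lowercased header keys and the lowercased content,
--     # separated by '\n' (which occurs in no signature), searched once per signature.
--     haystack = '\n'.join([k.lower() for k in headers] + [content.lower()])
--
--     signatures = [
--         ('Cloudflare', ['cf-ray', 'cf-cache-status', '__cfduid']),
--         ('Akamai', ['x-akamai', 'akamai-origin-hop']),
--         ('AWS CloudFront', ['x-amz-cf-id', 'via']),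
--         ('Fastly', ['x-fastly', 'fastly-io']),
--         ('Cloudfront', ['cloudfront']),
--         ('Incapsula', ['x-cdn', 'incap_ses']),
--         ('Sucuri', ['x-sucuri']),
--         ('ModSecurity', ['mod_security', 'modsecurity']),
--         ('AWS WAF', ['x-amzn-requestid']),
--         ('Cloudflare WAF', ['cf-ray']),
--         ('Imperva', ['incapsula', 'visid_incap']),
--         ('F5 BIG-IP', ['bigipserver', 'f5-']),
--         ('Barracuda', ['barra_counter_session']),
--         ('Wordfence', ['wordfence']),
--     ]
--
--     return {name: 'Detected' for name, sigs in signatures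
--             if any(sig in haystack for sig in sigs)}
-- ===== Notes on version B (the rewrite author's own statement) =====
-- stated objective: simpler
-- what changed: B replaces A's two dict builds and per-signature scan over every header key (with an explicit break) by one '\n'-joined haystack of lowered header keys plus lowered content, searched once per signature, and builds the result as a single dict comprehension over one merged signature list.
import Mathlib
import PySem

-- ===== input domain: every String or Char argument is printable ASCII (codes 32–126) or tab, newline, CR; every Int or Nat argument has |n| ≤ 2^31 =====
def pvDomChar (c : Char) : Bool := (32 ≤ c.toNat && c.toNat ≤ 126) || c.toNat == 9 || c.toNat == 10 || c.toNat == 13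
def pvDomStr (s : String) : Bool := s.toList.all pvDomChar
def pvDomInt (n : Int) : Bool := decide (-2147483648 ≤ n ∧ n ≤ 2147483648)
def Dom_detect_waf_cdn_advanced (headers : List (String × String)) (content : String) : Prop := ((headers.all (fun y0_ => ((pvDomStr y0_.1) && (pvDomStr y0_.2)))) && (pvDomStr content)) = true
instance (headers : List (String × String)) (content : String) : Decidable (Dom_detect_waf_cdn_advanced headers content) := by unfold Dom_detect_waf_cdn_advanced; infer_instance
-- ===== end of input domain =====

-- B replaces A's per-signature scan over every header key by one combined '\n'-joined
-- haystack (lowered keys + lowered content) searched once per signature (objective: simpler).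

-- ===== PORT A =====
-- inner 'for sig in signatures: if any(sig in h for h in headers_lower.keys()) or sig in content_lower: …; break'
def pvLoopSigs (keys : List String) (contentLower : String) : List String → Bool
  | [] => false
  | sig :: rest =>
    if keys.any (fun h => PySem.Str.isIn sig h) || PySem.Str.isIn sig contentLower then true
    else pvLoopSigs keys contentLower rest

-- {**cdn_signatures, **waf_signatures}: the two dict literals have disjoint keys, so the
-- merged dict is the cdn entries followed by the waf entries, in order; Source B writes the
-- same merged list out literally, so both ports share this one table constant.
def pvMergedSignatures : List (String × List String) := [
  ("Cloudflare", ["cf-ray", "cf-cache-status", "__cfduid"]),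
  ("Akamai", ["x-akamai", "akamai-origin-hop"]),
  ("AWS CloudFront", ["x-amz-cf-id", "via"]),
  ("Fastly", ["x-fastly", "fastly-io"]),
  ("Cloudfront", ["cloudfront"]),
  ("Incapsula", ["x-cdn", "incap_ses"]),
  ("Sucuri", ["x-sucuri"]),
  ("ModSecurity", ["mod_security", "modsecurity"]),
  ("AWS WAF", ["x-amzn-requestid"]),
  ("Cloudflare WAF", ["cf-ray"]),
  ("Imperva", ["incapsula", "visid_incap"]),
  ("F5 BIG-IP", ["bigipserver", "f5-"]),
  ("Barracuda", ["barra_counter_session"]),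
  ("Wordfence", ["wordfence"])
]

def detect_waf_cdn_advanced (headers : List (String × String)) (content : String) : List (String × String) :=
  -- headers_lower = {k.lower(): v for k, v in headers.items()}
  let headers_lower : PySem.Dict String String :=
    headers.foldl (fun d kv => d.insert (PySem.Str.lower kv.1) kv.2) ⟨[]⟩
  let content_lower := PySem.Str.lower content
  -- for name, signatures in {**cdn_signatures, **waf_signatures}.items(): …
  (pvMergedSignatures.foldl
    (fun (d : PySem.Dict String String) ns =>
      if pvLoopSigs headers_lower.keys content_lower ns.2 then d.insert ns.1 "Detected" else d)
    ⟨[]⟩).items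

-- ===== PORT B =====
def detect_waf_cdn_advanced_alt (headers : List (String × String)) (content : String) : List (String × String) :=
  -- haystack = '\n'.join([k.lower() for k in headers] + [content.lower()])
  let haystack :=
    PySem.Str.join "\n" (headers.map (fun kv => PySem.Str.lower kv.1) ++ [PySem.Str.lower content])
  -- {name: 'Detected' for name, sigs in signatures if any(sig in haystack for sig in sigs)}
  (pvMergedSignatures.filter (fun ns => ns.2.any (fun sig => PySem.Str.isIn sig haystack))).map
    (fun ns => (ns.1, "Detected"))

-- ===== PRECONDITION & SPEC =====
def Spec_detect_waf_cdn_advanced (headers : List (String × String)) (content : String) (out : List (String × String)) : Prop := out = detect_waf_cdn_advanced_alt headers content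
instance (headers : List (String × String)) (content : String) (out : List (String × String)) : Decidable (Spec_detect_waf_cdn_advanced headers content out) := by unfold Spec_detect_waf_cdn_advanced; infer_instance

-- ===== CLAIM (what is proved, stated in full; the proofs are below) =====
def Claim_equal_detect_waf_cdn_advanced : Prop := ∀ (headers : List (String × String)) (content : String), Dom_detect_waf_cdn_advanced headers content → Spec_detect_waf_cdn_advanced headers content (detect_waf_cdn_advanced headers content)

-- ===== LEMMAS AND PROOFS =====

-- a prefix of a ++ c :: b that avoids c is a prefix of a
lemma pv_prefix_append_cons {sub a b : List Char} {c : Char} (hc : c ∉ sub)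
    (h : sub <+: a ++ c :: b) : sub <+: a := by
  have hlen : sub.length ≤ a.length := by
    by_contra hgt0
    have hgt : a.length < sub.length := by omega
    have hlt : a.length < (a ++ c :: b).length := by simp
    have hmem : c ∈ sub := by
      obtain ⟨t, ht⟩ := h
      have : sub[a.length]'hgt = c := by
        have h1 : (sub ++ t)[a.length]'(by rw [ht]; exact hlt) = sub[a.length]'hgt :=
          List.getElem_append_left hgt
        have h2 : (a ++ c :: b)[a.length]'hlt = c := by
          rw [List.getElem_append_right (le_refl a.length)]
          simp
        rw [← h1]
        simp only [ht]
        exact h2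
      exact this ▸ (sub.getElem_mem hgt)
    exact hc hmem
  rw [List.prefix_iff_eq_take] at h ⊢
  rwa [List.take_append_of_le_length hlen] at h

-- an occurrence of a c-free pattern in a ++ c :: b lies in a or in b
lemma pv_infix_append_cons (sub a b : List Char) (c : Char) (hc : c ∉ sub) :
    sub <:+: a ++ c :: b ↔ sub <:+: a ∨ sub <:+: b := by
  constructor
  · intro h
    have := (PySem.Chars.exists_prefix_drop_iff_isIn sub (a ++ c :: b)).mpr
      ((PySem.Chars.isIn_iff_infix _ _).mpr h)
    obtain ⟨j, hj⟩ := this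
    by_cases hja : j ≤ a.length
    · rw [List.drop_append_of_le_length hja] at hj
      exact Or.inl ((pv_prefix_append_cons hc hj).isInfix.trans (List.drop_suffix j a).isInfix)
    · have hja' : a.length < j := by omega
      rw [List.drop_append] at hj
      have hd : List.drop j a = [] := by
        rw [List.drop_eq_nil_iff]; omega
        
      rw [hd, List.nil_append] at hj
      have : List.drop (j - a.length) (c :: b) = List.drop (j - a.length - 1) b := by
        have : j - a.length = (j - a.length - 1) + 1 := by omega
        rw [this]; rfl
      rw [this] at hj
      exact Or.inr (hj.isInfix.trans (List.drop_suffix _ b).isInfix)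
  · rintro (h | h)
    · exact h.trans (List.prefix_append a (c :: b)).isInfix
    · exact h.trans ((List.suffix_cons c b).trans (List.suffix_append a (c :: b))).isInfix

-- a '\n'-free pattern occurs in the '\n'-joined segments iff it occurs in some segment
lemma pv_infix_join (sub : List Char) (hc : ('\n' : Char) ∉ sub) :
    ∀ (segs : List (List Char)), segs ≠ [] →
      (sub <:+: PySem.Chars.join ['\n'] segs ↔ ∃ l ∈ segs, sub <:+: l)
  | [], h => absurd rfl h
  | [l], _ => by simp [PySem.Chars.join, List.intercalate]
  | l :: l' :: rest, _ => by
    rw [PySem.Chars.join_cons_cons]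
    have : l ++ ['\n'] ++ PySem.Chars.join ['\n'] (l' :: rest)
        = l ++ '\n' :: PySem.Chars.join ['\n'] (l' :: rest) := by simp
    rw [this, pv_infix_append_cons sub l _ '\n' hc,
      pv_infix_join sub hc (l' :: rest) (by simp)]
    simp

-- B's single haystack test agrees with A's per-key scan plus content test
lemma pv_isIn_haystack (sig : String) (hc : ('\n' : Char) ∉ sig.toList)
    (headers : List (String × String)) (content : String) :
    PySem.Str.isIn sig
        (PySem.Str.join "\n" (headers.map (fun kv => PySem.Str.lower kv.1)
          ++ [PySem.Str.lower content]))
      = ((headers.map (fun kv => PySem.Str.lower kv.1)).any (fun h => PySem.Str.isIn sig h)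
          || PySem.Str.isIn sig (PySem.Str.lower content)) := by
  rw [Bool.eq_iff_iff]
  rw [PySem.Str.isIn_iff_infix, PySem.Str.toList_join]
  have hne : (List.map String.toList
      (headers.map (fun kv => PySem.Str.lower kv.1) ++ [PySem.Str.lower content])) ≠ [] := by
    simp
  rw [show ("\n" : String).toList = ['\n'] from rfl, pv_infix_join sig.toList hc _ hne]
  simp only [List.map_append, List.map_map, List.mem_append, List.any_eq_true, Bool.or_eq_true,
    PySem.Str.isIn_iff_infix, List.mem_map, List.map_cons, List.map_nil, List.mem_cons,
    List.not_mem_nil, or_false]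
  constructor
  · rintro ⟨l, (⟨kv, hkv, rfl⟩ | rfl), hl⟩
    · exact Or.inl ⟨_, ⟨kv, hkv, rfl⟩, hl⟩
    · exact Or.inr hl
  · rintro (⟨h, ⟨kv, hkv, rfl⟩, hl⟩ | hl)
    · exact ⟨_, Or.inl ⟨kv, hkv, rfl⟩, hl⟩
    · exact ⟨_, Or.inr rfl, hl⟩

-- keys of Dict.insert, as a membership statement
lemma pv_mem_keys_insert (d : PySem.Dict String String) (k v : String) (x : String) :
    x ∈ (d.insert k v).keys ↔ x ∈ d.keys ∨ x = k := by
  unfold PySem.Dict.insert PySem.Dict.keys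
  split_ifs with h
  · unfold PySem.Dict.contains at h
    simp only [List.any_eq_true, beq_iff_eq] at h
    obtain ⟨p, hp, hpk⟩ := h
    simp only [List.map_map, List.mem_map]
    constructor
    · rintro ⟨q, hq, rfl⟩
      by_cases hqk : q.1 = k
      · simp [Function.comp, hqk]
      · simp only [Function.comp, hqk, beq_iff_eq]
        exact Or.inl ⟨q, hq, rfl⟩
    · rintro (⟨q, hq, rfl⟩ | rfl)
      · by_cases hqk : q.1 = k
        · exact ⟨p, hp, by simp [Function.comp, hpk, hqk]⟩
        · exact ⟨q, hq, by simp [Function.comp, hqk]⟩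
      · exact ⟨p, hp, by simp [Function.comp, hpk]⟩
  · simp
  
-- keys of the headers_lower dict are exactly the lowered header keys (as a set)
lemma pv_mem_keys_fold (headers : List (String × String)) (x : String) :
    ∀ (d : PySem.Dict String String),
      (x ∈ (headers.foldl (fun d kv => d.insert (PySem.Str.lower kv.1) kv.2) d).keys
        ↔ x ∈ d.keys ∨ x ∈ headers.map (fun kv => PySem.Str.lower kv.1)) := by
  induction headers with
  | nil => intro d; simp
  | cons kv rest ih =>
    intro d
    simp only [List.foldl_cons, ih, pv_mem_keys_insert, List.map_cons, List.mem_cons]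
    tauto

-- A's inner loop with break is the 'any' over the signatures
lemma pv_loopSigs_eq (keys : List String) (cl : String) (sigs : List String) :
    pvLoopSigs keys cl sigs
      = sigs.any (fun sig => keys.any (fun h => PySem.Str.isIn sig h) || PySem.Str.isIn sig cl) := by
  induction sigs with
  | nil => rfl
  | cons s rest ih =>
    rw [pvLoopSigs, List.any_cons, ih]
    cases h : ((keys.any fun h => PySem.Str.isIn s h) || PySem.Str.isIn s cl) <;> simp

lemma pv_any_congr {a : Type} {l : List a} {p q : a -> Bool}
    (h : forall x, x ∈ l -> p x = q x) : l.any p = l.any q := by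
  induction l with
  | nil => rfl
  | cons x t ih => simp [h x (by simp), ih (fun y hy => h y (by simp [hy]))]

lemma pv_contains_iff_keys (d : PySem.Dict String String) (k : String) :
    d.contains k = true ↔ k ∈ d.keys := by
  unfold PySem.Dict.contains PySem.Dict.keys
  simp

-- the outer dict-building loop is a filter-and-map when all inserted names are fresh
lemma pv_fold_insert_eq_filter (p : String × List String → Bool) :
    ∀ (table : List (String × List String)) (d : PySem.Dict String String),
      (table.map Prod.fst).Nodup → (∀ x ∈ table, x.1 ∉ d.keys) →
      (table.foldl (fun d ns => if p ns then d.insert ns.1 "Detected" else d) d).items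
        = d.items ++ (table.filter p).map (fun ns => (ns.1, "Detected"))
  | [], d, _, _ => by simp
  | ns :: rest, d, hnd, hk => by
    simp only [List.map_cons, List.nodup_cons] at hnd
    have hfresh : ns.1 ∉ d.keys := hk ns (by simp)
    by_cases hp : p ns
    · have hins : d.insert ns.1 "Detected" = ⟨d.items ++ [(ns.1, "Detected")]⟩ := by
        unfold PySem.Dict.insert
        rw [if_neg (by
          intro hcon
          exact hfresh ((pv_contains_iff_keys d ns.1).mp hcon))]
      have hkeys : (⟨d.items ++ [(ns.1, "Detected")]⟩ : PySem.Dict String String).keys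
          = d.keys ++ [ns.1] := by
        unfold PySem.Dict.keys; simp
      rw [List.foldl_cons, if_pos hp, hins,
        pv_fold_insert_eq_filter p rest _ hnd.2 (by
          intro x hx
          rw [hkeys]
          simp only [List.mem_append, List.mem_singleton]
          rintro (hxd | hxn)
          · exact hk x (by simp [hx]) hxd
          · exact hnd.1 (by rw [← hxn]; exact List.mem_map_of_mem hx))]
      simp [hp]
    · rw [List.foldl_cons, if_neg hp,
        pv_fold_insert_eq_filter p rest d hnd.2 (fun x hx => hk x (by simp [hx]))]
      simp [hp]

-- ===== VERDICT (by name: the statement is the Claim_ definition above) =====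
theorem detect_waf_cdn_advanced_spec : Claim_equal_detect_waf_cdn_advanced := by
  intro headers content _
  unfold Spec_detect_waf_cdn_advanced detect_waf_cdn_advanced detect_waf_cdn_advanced_alt
  rw [pv_fold_insert_eq_filter _ pvMergedSignatures ⟨[]⟩ (by decide)
    (by intro x _; simp [PySem.Dict.keys])]
  simp only [List.nil_append]
  rw [show pvMergedSignatures = pvMergedSignatures from rfl]
  congr 1
  apply List.filter_congr
  intro ns hns
  rw [pv_loopSigs_eq]
  apply pv_any_congr
  intro sig hsig
  have hnl : ('\n' : Char) ∉ sig.toList := by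
    have : ∀ x ∈ pvMergedSignatures, ∀ s ∈ x.2, ('\n' : Char) ∉ s.toList := by decide
    exact this ns hns sig hsig
  rw [pv_isIn_haystack sig hnl headers content]
  congr 1
  rw [Bool.eq_iff_iff]
  simp only [List.any_eq_true]
  constructor
  · rintro ⟨h, hh, hin⟩
    have := (pv_mem_keys_fold headers h ⟨[]⟩).mp hh
    simp only [PySem.Dict.keys, List.map_nil, List.not_mem_nil, false_or] at this
    exact ⟨h, this, hin⟩
  · rintro ⟨h, hh, hin⟩
    refine ⟨h, (pv_mem_keys_fold headers h ⟨[]⟩).mpr (Or.inr hh), hin⟩
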